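-- pv_equiv track=rewrite | github.com/posl/comment_recommendation | script/split_gen/3_time/ja/200_C/7.py | count200
-- ===== SOURCE A (Python) =====
-- def count200(N, A):
--     # 200で割った余りをカウント
--     C = [0] * 200
--     for a in A:
--         C[a % 200] += 1
--     # 余りごとに組み合わせを数える
--     ans = 0
--     for c in C:
--         ans += c * (c - 1) // 2
--     return ans
-- ===== SOURCE B (Python) =====
-- def count200(N, A):
--     # One pass: for each element, add the number of earlier elements with the
--     # same residue mod 200, then record this element's residue.
--     seen = {}
--     ans = 0
--     for a in A:
--         r = a % 200
--         c = seen.get(r, 0)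
--         ans += c
--         seen[r] = c + 1
--     return ans
-- ===== Notes on version B (the rewrite author's own statement) =====
-- stated objective: alternative
-- what changed: Replaced the fixed 200-slot counting array plus a second combination-sum loop (c*(c-1)//2 per residue) with a single incremental pass over A that adds, for each element, the count of previously seen elements with the same residue kept in a dict.
import Mathlib
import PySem

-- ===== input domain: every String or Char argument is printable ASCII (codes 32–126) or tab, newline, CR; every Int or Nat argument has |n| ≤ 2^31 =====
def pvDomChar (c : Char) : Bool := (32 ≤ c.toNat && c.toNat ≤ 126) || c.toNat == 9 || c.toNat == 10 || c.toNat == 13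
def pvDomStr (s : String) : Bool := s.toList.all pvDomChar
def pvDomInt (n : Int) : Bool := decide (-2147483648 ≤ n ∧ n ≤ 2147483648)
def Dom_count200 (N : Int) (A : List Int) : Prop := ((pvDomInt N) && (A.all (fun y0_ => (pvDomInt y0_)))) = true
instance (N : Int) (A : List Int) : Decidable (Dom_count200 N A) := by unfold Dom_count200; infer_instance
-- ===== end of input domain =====

-- B replaces A's 200-slot array + combination-sum loop with one incremental dict pass (alternative decomposition, same cost).


-- ===== PORT A =====
-- C[a % 200] += 1 : the index a % 200 is always in [0, 200), so the getD/set
-- pair below is exact (Python's IndexError is unreachable); .toNat is exact since a % 200 ≥ 0.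
def count200 (N : Int) (A : List Int) : Int :=
  let C : List Int := A.foldl (fun C a =>
    let i := (PySem.Int.mod a 200).toNat
    C.set i (C.getD i 0 + 1)) (List.replicate 200 (0 : Int))
  C.foldl (fun ans c => ans + PySem.Int.floordiv (c * (c - 1)) 2) 0

-- ===== PORT B =====
def count200_alt (N : Int) (A : List Int) : Int :=
  (A.foldl (fun (st : PySem.Dict Int Int × Int) a =>
      let r := PySem.Int.mod a 200
      let c := st.1.getD r 0
      (st.1.insert r (c + 1), st.2 + c)) (PySem.Dict.empty, 0)).2

-- ===== PRECONDITION & SPEC =====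
def Spec_count200 (N : Int) (A : List Int) (out : Int) : Prop := out = count200_alt N A
instance (N : Int) (A : List Int) (out : Int) : Decidable (Spec_count200 N A out) := by unfold Spec_count200; infer_instance

-- ===== CLAIM (what is proved, stated in full; the proofs are below) =====
def Claim_equal_count200 : Prop := ∀ (N : Int) (A : List Int), Dom_count200 N A → Spec_count200 N A (count200 N A)

-- ===== LEMMAS AND PROOFS =====

-- pair-count contribution of one residue bucket
def pvG (c : Int) : Int := PySem.Int.floordiv (c * (c - 1)) 2

-- c*(c-1)//2 gains exactly c when the bucket grows from c to c+1
theorem pvG_succ (c : Int) : pvG (c + 1) = pvG c + c := by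
  unfold pvG
  rw [show (c + 1) * (c + 1 - 1) = c * (c - 1) + c * 2 by ring]
  rw [PySem.Int.floordiv_eq_ediv_of_pos (by norm_num),
      PySem.Int.floordiv_eq_ediv_of_pos (by norm_num)]
  exact Int.add_mul_ediv_right _ _ (by norm_num)

-- the main invariant: B's running answer tracks A's bucket sums
theorem pv_main (xs : List Int) (C : List Int) (d : PySem.Dict Int Int) (ans : Int)
    (hlen : C.length = 200)
    (hC : ∀ r : Int, 0 ≤ r → r < 200 → d.getD r 0 = C.getD r.toNat 0) :
    (xs.foldl (fun (st : PySem.Dict Int Int × Int) a =>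
        let r := PySem.Int.mod a 200
        let c := st.1.getD r 0
        (st.1.insert r (c + 1), st.2 + c)) (d, ans)).2
      = ans + ((xs.foldl (fun C a =>
          let i := (PySem.Int.mod a 200).toNat
          C.set i (C.getD i 0 + 1)) C).map pvG).sum - (C.map pvG).sum := by
  induction xs generalizing C d ans with
  | nil => simp
  | cons a xs ih =>
    simp only [List.foldl_cons]
    set r := PySem.Int.mod a 200 with hr
    have hr0 : 0 ≤ r := PySem.Int.mod_nonneg a (by norm_num)
    have hr200 : r < 200 := PySem.Int.mod_lt a (by norm_num)
    have hi : r.toNat < C.length := by omega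
    set i := r.toNat with hidef
    set c := d.getD r 0 with hc
    have hcC : c = C.getD i 0 := hC r hr0 hr200
    have hC' : ∀ r' : Int, 0 ≤ r' → r' < 200 →
        (d.insert r (c + 1)).getD r' 0 = (C.set i (C.getD i 0 + 1)).getD r'.toNat 0 := by
      intro r' h0 h200
      rw [PySem.Dict.getD_insert]
      by_cases h : r' = r
      · subst h
        rw [if_pos rfl, List.getD_eq_getElem?_getD, List.getElem?_set_self (by omega)]
        simp [hcC, List.getD_eq_getElem?_getD]
      · rw [if_neg h, List.getD_eq_getElem?_getD,
            List.getElem?_set_ne (by omega), ← List.getD_eq_getElem?_getD]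
        exact hC r' h0 h200
    rw [ih (C.set i (C.getD i 0 + 1)) (d.insert r (c + 1)) (ans + c)
          (by simp [hlen]) hC']
    have hsum : ((C.set i (C.getD i 0 + 1)).map pvG).sum = (C.map pvG).sum + c := by
      have hiM : i < (C.map pvG).length := by simpa using hi
      rw [List.map_set, List.sum_set' (C.map pvG) i (pvG (C.getD i 0 + 1)), dif_pos hiM]
      have hget : (C.map pvG)[i]'hiM = pvG (C.getD i 0) := by
        simp [List.getD_eq_getElem?_getD, List.getElem?_eq_getElem hi]
      rw [hget, pvG_succ, ← hcC]
      ring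
    rw [hsum]; ring

-- ===== VERDICT (by name: the statement is the Claim_ definition above) =====
theorem count200_spec : Claim_equal_count200 := by
  intro N A _
  show count200 N A = count200_alt N A
  simp only [count200, count200_alt]
  rw [show (List.foldl (fun ans c => ans + PySem.Int.floordiv (c * (c - 1)) 2) 0
        (List.foldl (fun C a => C.set (PySem.Int.mod a 200).toNat (C.getD (PySem.Int.mod a 200).toNat 0 + 1))
          (List.replicate 200 (0 : Int)) A))
      = 0 + ((List.foldl (fun C a => C.set (PySem.Int.mod a 200).toNat (C.getD (PySem.Int.mod a 200).toNat 0 + 1))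
          (List.replicate 200 (0 : Int)) A).map pvG).sum
    from PySem.List.foldl_add _ pvG 0]
  rw [pv_main A (List.replicate 200 (0 : Int)) PySem.Dict.empty 0
        List.length_replicate
        (by intro r h0 h200
            rw [List.getD_eq_getElem?_getD, List.getElem?_replicate, if_pos (by omega)]
            simp [pysem])]
  have h0 : ((List.replicate 200 (0 : Int)).map pvG).sum = 0 := by
    have hp : pvG 0 = 0 := by decide
    rw [List.map_replicate, hp, List.sum_replicate]; simp
  rw [h0]; ring
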